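-- pv_equiv track=rewrite | github.com/manavhirani/battleship-ai | mcts.py | possible_ship_positions
-- ===== SOURCE A (Python) =====
-- def possible_ship_positions(hits, size):
--     s = len(hits)
--     positions = []
--     for i in range(s):
--         for j in range(s-size):
--             locs = [x for x in hits[i][j:j+size]]
--             if 2 not in locs:
--                 positions.append((i,j))
--     for i in range(s-size):
--         for j in range(s):
--             locs = [x[j] for x in hits[i:i+size]]
--             if 2 not in locs:
--                 positions.append((i,j))
--     return positions
-- ===== SOURCE B (Python) =====
-- def _prefix(cells):
--     # pref[k] = number of hit cells (value 2) among cells[:k]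
--     pref = [0]
--     for x in cells:
--         pref.append(pref[-1] + (x == 2))
--     return pref
--
--
-- def possible_ship_positions(hits, size):
--     s = len(hits)
--     positions = []
--     # horizontal: one prefix-count array per row, each window tested by one comparison
--     for i in range(s):
--         pref = _prefix(hits[i])
--         for j in range(s - size):
--             if pref[j + size] == pref[j]:
--                 positions.append((i, j))
--     # vertical: prefix-count arrays over the transposed grid
--     col_prefs = [_prefix(col) for col in zip(*hits)]
--     for i in range(s - size):
--         for j in range(s):
--             if col_prefs[j][i + size] == col_prefs[j][i]:
--                 positions.append((i, j))
--     return positions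
-- ===== Notes on version B (the rewrite author's own statement) =====
-- stated objective: alternative
-- what changed: Replaces the per-window slice scan and '2 not in' membership test with prefix-sum counts of hit cells per row and per zip-transposed column, testing each window by one comparison; Pre_ excludes negative ship sizes on nonempty grids (A's values there are Python slice/index wraparound accidents) and ragged grids with size < len(hits) (A raises IndexError or returns slice-clamped accidental values; B raises).
-- outside the precondition, e.g. on possible_ship_positions([[2, 1]], -1): A returns [(0, 1), (0, 0), (1, 0)], B returns []; on possible_ship_positions([[0, 0], [0]], 1): A returns [(0, 0), (1, 0), (0, 0), (0, 1)], B raises IndexError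
import Mathlib
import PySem

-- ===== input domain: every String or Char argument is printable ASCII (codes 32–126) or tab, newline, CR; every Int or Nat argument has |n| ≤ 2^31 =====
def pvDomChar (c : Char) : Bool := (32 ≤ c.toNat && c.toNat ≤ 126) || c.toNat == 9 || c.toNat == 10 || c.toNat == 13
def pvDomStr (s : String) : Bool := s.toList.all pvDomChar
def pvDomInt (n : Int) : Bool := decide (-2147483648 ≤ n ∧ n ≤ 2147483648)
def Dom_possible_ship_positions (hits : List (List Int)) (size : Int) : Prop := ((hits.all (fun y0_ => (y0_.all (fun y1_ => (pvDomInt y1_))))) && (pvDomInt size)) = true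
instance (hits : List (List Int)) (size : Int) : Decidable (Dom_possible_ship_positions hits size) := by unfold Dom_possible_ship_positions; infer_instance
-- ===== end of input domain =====

-- B replaces A's per-window slice scan by prefix counts of hit cells per row and per
-- zip-transposed column, testing each candidate window with one comparison (objective: alternative).

-- ===== PORT A =====
def possible_ship_positions (hits : List (List Int)) (size : Int) : List (Int × Int) :=
  let s : Int := hits.length
  let positions : List (Int × Int) :=
    (PySem.List.pyRange 0 s 1).foldl (fun acc i =>
      (PySem.List.pyRange 0 (s - size) 1).foldl (fun acc2 j =>
        -- locs = [x for x in hits[i][j:j+size]]  (i is always in range, so hits[i] is pyGetD with an unused default)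
        let locs := PySem.List.slice (PySem.List.pyGetD hits i []) (some j) (some (j + size))
        if ¬ (2 ∈ locs) then acc2 ++ [(i, j)] else acc2) acc) []
  -- second loop nest: vertical placements; x[j] may raise IndexError in Python, excluded by Pre_
  (PySem.List.pyRange 0 (s - size) 1).foldl (fun acc i =>
    (PySem.List.pyRange 0 s 1).foldl (fun acc2 j =>
      let locs := (PySem.List.slice hits (some i) (some (i + size))).map (fun x => PySem.List.pyGetD x j 0)
      if ¬ (2 ∈ locs) then acc2 ++ [(i, j)] else acc2) acc) positions

-- ===== PORT B =====
-- helper _prefix of Source B: pref.append(pref[-1] + (x == 2))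
def prefixCounts (cells : List Int) : List Int :=
  cells.foldl (fun pref x =>
    pref ++ [PySem.List.pyGetD pref (-1) 0 + (if x = 2 then (1:Int) else 0)]) [0]

-- zip(*rows): the columns, truncated to the shortest row (exact for Python's zip on lists;
-- entries are read with getD, always in range below the minimum length)
def zipCols (rows : List (List Int)) : List (List Int) :=
  (List.range ((rows.map List.length).min?.getD 0)).map (fun j => rows.map (fun r => r.getD j 0))

def possible_ship_positions_alt (hits : List (List Int)) (size : Int) : List (Int × Int) :=
  let s : Int := hits.length
  let positions : List (Int × Int) :=
    (PySem.List.pyRange 0 s 1).foldl (fun acc i =>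
      let pref := prefixCounts (PySem.List.pyGetD hits i [])
      (PySem.List.pyRange 0 (s - size) 1).foldl (fun acc2 j =>
        if PySem.List.pyGetD pref (j + size) 0 = PySem.List.pyGetD pref j 0
        then acc2 ++ [(i, j)] else acc2) acc) []
  let colPrefs := (zipCols hits).map prefixCounts
  (PySem.List.pyRange 0 (s - size) 1).foldl (fun acc i =>
    (PySem.List.pyRange 0 s 1).foldl (fun acc2 j =>
      let pj := PySem.List.pyGetD colPrefs j []
      if PySem.List.pyGetD pj (i + size) 0 = PySem.List.pyGetD pj i 0
      then acc2 ++ [(i, j)] else acc2) acc) positions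

-- ===== PRECONDITION & SPEC =====
-- Pre_ excludes negative ship sizes on nonempty grids (Python's negative slice/index
-- wraparound makes A's values there accidents of the implementation) and, for
-- 0 ≤ size < len(hits), grids with a row shorter than len(hits) (A raises IndexError on
-- x[j] or returns slice-clamped accidental values; B raises IndexError).
def Pre_possible_ship_positions (hits : List (List Int)) (size : Int) : Prop :=
  hits = [] ∨ (0 ≤ size ∧ ((hits.length : Int) ≤ size ∨ ∀ row ∈ hits, hits.length ≤ row.length))
instance (hits : List (List Int)) (size : Int) : Decidable (Pre_possible_ship_positions hits size) := by unfold Pre_possible_ship_positions; infer_instance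

def pvWitness_possible_ship_positions : List (List Int) × Int := ([[0, 2], [0, 0]], 1)

def Spec_possible_ship_positions (hits : List (List Int)) (size : Int) (out : List (Int × Int)) : Prop := out = possible_ship_positions_alt hits size
instance (hits : List (List Int)) (size : Int) (out : List (Int × Int)) : Decidable (Spec_possible_ship_positions hits size out) := by unfold Spec_possible_ship_positions; infer_instance

-- ===== CLAIM (what is proved, stated in full; the proofs are below) =====
def Claim_equal_possible_ship_positions : Prop := ∀ (hits : List (List Int)) (size : Int), Dom_possible_ship_positions hits size → Pre_possible_ship_positions hits size → Spec_possible_ship_positions hits size (possible_ship_positions hits size)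

-- ===== LEMMAS AND PROOFS =====

-- the prefix loop of _prefix, characterised (accumulator kept in 'P ++ [c]' form)
lemma prefixCounts_foldl (cells : List Int) (P : List Int) (c : Int) :
    cells.foldl (fun pref x =>
        pref ++ [PySem.List.pyGetD pref (-1) 0 + (if x = 2 then (1:Int) else 0)]) (P ++ [c])
    = (P ++ [c]) ++ (List.range cells.length).map (fun k => c + ((cells.take (k+1)).count 2 : Int)) := by
  induction cells generalizing P c with
  | nil => simp
  | cons x xs ih =>
    simp only [List.foldl_cons, PySem.List.pyGetD_neg_one_append_singleton]
    rw [show P ++ [c] ++ [c + (if x = 2 then (1:Int) else 0)]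
        = (P ++ [c]) ++ [c + (if x = 2 then (1:Int) else 0)] from rfl] at *
    rw [show (P ++ [c]) ++ [c + (if x = 2 then (1:Int) else 0)]
        = (P ++ [c]) ++ [c + (if x = 2 then (1:Int) else 0)] ++ [] from by simp]
    rw [show (P ++ [c]) ++ [c + (if x = 2 then (1:Int) else 0)] ++ []
        = (P ++ [c]) ++ [c + (if x = 2 then (1:Int) else 0)] from by simp, ih]
    have hmap : (List.range (xs.length+1)).map (fun k => c + (((x::xs).take (k+1)).count 2 : Int))
        = (c + (if x = 2 then (1:Int) else 0))
          :: (List.range xs.length).map (fun k => (c + (if x = 2 then (1:Int) else 0)) + ((xs.take (k+1)).count 2 : Int)) := by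
      rw [List.range_succ_eq_map, List.map_cons, List.map_map]
      congr 1
      · simp only [List.take_succ_cons, List.take_zero]
        by_cases h : x = 2 <;> simp [h]
      · refine List.map_congr_left (fun k hk => ?_)
        simp only [Function.comp_apply, List.take_succ_cons, List.count_cons]
        by_cases h : x = 2 <;> simp [h, add_assoc, add_comm]
    simp only [List.length_cons, hmap, List.append_assoc]
    rfl

lemma prefixCounts_getD (cells : List Int) (k : Nat) (hk : k ≤ cells.length) :
    (prefixCounts cells).getD k 0 = ((cells.take k).count 2 : Int) := by
  unfold prefixCounts
  rw [show ([0] : List Int) = [] ++ [0] from rfl, prefixCounts_foldl]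
  cases k with
  | zero => simp
  | succ m =>
    have hm : m < cells.length := by omega
    simp only [List.nil_append, List.cons_append, List.getD_cons_succ]
    rw [List.getD_eq_getElem _ _ (by simpa using hm)]
    simp

lemma count_drop_take (xs : List Int) (a b : Nat) (hab : a ≤ b) :
    (((xs.drop a).take (b - a)).count 2 : Int)
      = ((xs.take (min b xs.length)).count 2 : Int) - ((xs.take (min a xs.length)).count 2 : Int) := by
  have h1 : xs.take (min b xs.length) = xs.take b := by
    rw [List.take_eq_take_iff]; omega
  have h2 : xs.take (min a xs.length) = xs.take a := by
    rw [List.take_eq_take_iff]; omega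
  rw [h1, h2, show b = a + (b - a) by omega, List.take_add, List.count_append]
  push_cast
  have : a + (b - a) - a = b - a := by omega
  rw [this]
  ring

-- a prefix-count equality says exactly "the window contains no 2"
lemma diff_iff (xs : List Int) (a b : Nat) (hab : a ≤ b) :
    ((prefixCounts xs).getD (min b xs.length) 0 = (prefixCounts xs).getD (min a xs.length) 0)
      ↔ ¬ 2 ∈ (xs.drop a).take (b - a) := by
  rw [prefixCounts_getD _ _ (by omega), prefixCounts_getD _ _ (by omega)]
  constructor
  · intro h hmem
    have hd := count_drop_take xs a b hab
    rw [h, sub_self] at hd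
    have hc : ((xs.drop a).take (b - a)).count 2 = 0 := by exact_mod_cast hd
    exact (List.count_eq_zero.mp hc) hmem
  · intro hmem
    have hc : (((xs.drop a).take (b - a)).count 2 : Int) = 0 := by
      exact_mod_cast List.count_eq_zero.mpr hmem
    have hd := count_drop_take xs a b hab
    rw [hc] at hd
    linarith [hd]

-- the window condition for indices inside the list
lemma window_cond (xs : List Int) (i size : Int) (h0 : 0 ≤ i) (hs : 0 ≤ size)
    (hb : i + size ≤ (xs.length : Int)) :
    (PySem.List.pyGetD (prefixCounts xs) (i + size) 0 = PySem.List.pyGetD (prefixCounts xs) i 0)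
    ↔ ¬ 2 ∈ (xs.drop i.toNat).take ((i + size).toNat - i.toNat) := by
  rw [PySem.List.pyGetD_of_nonneg _ _ (by omega), PySem.List.pyGetD_of_nonneg _ _ h0]
  have h := diff_iff xs i.toNat (i + size).toNat (by omega)
  rwa [min_eq_left (by omega), min_eq_left (by omega)] at h

-- zip truncates to the minimum row length; with every row at least hits.length long,
-- that minimum is at least hits.length
lemma min_rows_le (hits : List (List Int)) (hne : hits ≠ [])
    (hall : ∀ row ∈ hits, hits.length ≤ row.length) :
    hits.length ≤ (hits.map List.length).min?.getD 0 := by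
  cases hmin : (hits.map List.length).min? with
  | none =>
    rw [List.min?_eq_none_iff, List.map_eq_nil_iff] at hmin
    exact absurd hmin hne
  | some m =>
    obtain ⟨hmem, -⟩ := List.min?_eq_some_iff.mp hmin
    rw [List.mem_map] at hmem
    obtain ⟨r, hr, rfl⟩ := hmem
    simpa using hall r hr

-- congruence for a foldl whose initial accumulators already agree
lemma foldl_congr_init {α β : Type} (l : List α) (f g : β → α → β) {iA iB : β}
    (h0 : iA = iB) (h : ∀ x ∈ l, ∀ acc, f acc x = g acc x) :
    l.foldl f iA = l.foldl g iB := by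
  subst h0; exact PySem.List.foldl_congr_mem' l f g _ h

-- ===== VERDICT (by name: the statement is the Claim_ definition above) =====
theorem possible_ship_positions_spec : Claim_equal_possible_ship_positions := by
  intro hits size _hDom hPre
  unfold Spec_possible_ship_positions possible_ship_positions possible_ship_positions_alt
  simp only []
  rcases hPre with hnil | ⟨hsz, hcase⟩
  · subst hnil
    simp only [List.length_nil, Nat.cast_zero,
      PySem.List.pyRange_one_eq_nil (le_refl (0:Int)), List.foldl_nil, List.foldl_fixed]
  · rcases hcase with hbig | hall
    · have hr : PySem.List.pyRange 0 ((hits.length:Int) - size) 1 = [] :=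
        PySem.List.pyRange_one_eq_nil (by omega)
      simp only [hr, List.foldl_nil, List.foldl_fixed]
    · by_cases hbig : (hits.length : Int) ≤ size
      · have hr : PySem.List.pyRange 0 ((hits.length:Int) - size) 1 = [] :=
          PySem.List.pyRange_one_eq_nil (by omega)
        simp only [hr, List.foldl_nil, List.foldl_fixed]
      · -- main case: 0 ≤ size < hits.length, every row at least hits.length long
        have hne : hits ≠ [] := by
          intro h; subst h; simp at hbig; omega
        have hmin := min_rows_le hits hne hall
        refine foldl_congr_init _ _ _ ?_ ?_
        · -- horizontal nests agree
          refine foldl_congr_init _ _ _ rfl ?_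
          intro i hi acc
          obtain ⟨h0i, hilt⟩ := PySem.List.mem_pyRange_one.mp hi
          refine PySem.List.foldl_congr_mem' _ _ _ _ ?_
          intro j hj acc2
          obtain ⟨h0j, hjlt⟩ := PySem.List.mem_pyRange_one.mp hj
          have hrowmem : PySem.List.pyGetD hits i [] ∈ hits := by
            refine PySem.List.pyGetD_mem hits [] ?_
            simp only [PySem.Raise.InRange]
            omega
          have hrowlen : hits.length ≤ (PySem.List.pyGetD hits i []).length :=
            hall _ hrowmem
          have hc := window_cond (PySem.List.pyGetD hits i []) j size h0j hsz
            (by omega)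
          rw [PySem.List.slice_toNat _ h0j (by omega)]
          by_cases hm : 2 ∈ List.take ((j + size).toNat - j.toNat)
              (List.drop j.toNat (PySem.List.pyGetD hits i []))
          · rw [if_neg (by simpa using hm), if_neg (fun hcond => (hc.mp hcond) hm)]
          · rw [if_pos hm, if_pos (hc.mpr hm)]
        · -- vertical nests agree
          intro i hi acc
          obtain ⟨h0i, hilt⟩ := PySem.List.mem_pyRange_one.mp hi
          refine PySem.List.foldl_congr_mem' _ _ _ _ ?_
          intro j hj acc2
          obtain ⟨h0j, hjlt⟩ := PySem.List.mem_pyRange_one.mp hj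
          -- B's column prefix list at j
          have hzlen : (zipCols hits).length = (hits.map List.length).min?.getD 0 := by
            simp [zipCols]
          have hjz : j.toNat < (zipCols hits).length := by rw [hzlen]; omega
          have hpj : PySem.List.pyGetD ((zipCols hits).map prefixCounts) j []
              = prefixCounts (hits.map (fun r => r.getD j.toNat 0)) := by
            rw [PySem.List.pyGetD_eq_getElem _ _ h0j (by rw [List.length_map]; omega),
              List.getElem_map]
            congr 1
            simp [zipCols]
          rw [hpj]
          have hc := window_cond (hits.map (fun r => r.getD j.toNat 0)) i size h0i hsz
            (by rw [List.length_map]; omega)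
          rw [PySem.List.slice_toNat hits h0i (by omega)]
          have hg : (fun x : List Int => PySem.List.pyGetD x j 0)
              = (fun r : List Int => r.getD j.toNat 0) :=
            funext (fun x => PySem.List.pyGetD_of_nonneg x 0 h0j)
          rw [List.map_take, List.map_drop, hg]
          by_cases hm : 2 ∈ List.take ((i + size).toNat - i.toNat)
              (List.drop i.toNat (hits.map (fun r : List Int => r.getD j.toNat 0)))
          · rw [if_neg (by simpa using hm), if_neg (fun hcond => (hc.mp hcond) hm)]
          · rw [if_pos hm, if_pos (hc.mpr hm)]
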